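-- pv_equiv track=rewrite | github.com/zs930831/Practice | Demo/多行输入.py | dpa
-- ===== SOURCE A (Python) =====
-- def dpa(di, pi, ai):
--     num=len(ai)
--     count = [0] * (num + 1)
--     count[0] = 0
--     for j in range(1, num + 1):
--         tempPi=0
--         for i in range(len(di)):
--             if ai[j-1]-di[i] >= 0:
--                 temp = pi[i]
--                 if temp > tempPi:
--                     tempPi = temp
--
--         count[j] = tempPi
--
--     return count[1:]
-- ===== SOURCE B (Python) =====
-- def dpa(di, pi, ai):
--     # Sort (difficulty, profit) pairs by difficulty, precompute running best profit
--     # (floored at 0), then answer each query with a binary search (bisect_right).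
--     pairs = sorted(zip(di, pi), key=lambda t: t[0])
--     ds = [d for d, _ in pairs]
--     pm = [0]
--     best = 0
--     for _, p in pairs:
--         if p > best:
--             best = p
--         pm.append(best)
--     out = []
--     for a in ai:
--         # inline bisect_right (the bisect module may not be imported here)
--         lo, hi = 0, len(ds)
--         while lo < hi:
--             mid = (lo + hi) // 2
--             if a < ds[mid]:
--                 hi = mid
--             else:
--                 lo = mid + 1
--         out.append(pm[lo])
--     return out
-- ===== Notes on version B (the rewrite author's own statement) =====
-- stated objective: faster
-- what changed: A rescans all (di, pi) pairs for every query; B sorts the pairs by difficulty once, precomputes a running prefix-maximum of profits (floored at 0), and answers each query with a binary search (bisect_right) into the sorted difficulties.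
import Mathlib
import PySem

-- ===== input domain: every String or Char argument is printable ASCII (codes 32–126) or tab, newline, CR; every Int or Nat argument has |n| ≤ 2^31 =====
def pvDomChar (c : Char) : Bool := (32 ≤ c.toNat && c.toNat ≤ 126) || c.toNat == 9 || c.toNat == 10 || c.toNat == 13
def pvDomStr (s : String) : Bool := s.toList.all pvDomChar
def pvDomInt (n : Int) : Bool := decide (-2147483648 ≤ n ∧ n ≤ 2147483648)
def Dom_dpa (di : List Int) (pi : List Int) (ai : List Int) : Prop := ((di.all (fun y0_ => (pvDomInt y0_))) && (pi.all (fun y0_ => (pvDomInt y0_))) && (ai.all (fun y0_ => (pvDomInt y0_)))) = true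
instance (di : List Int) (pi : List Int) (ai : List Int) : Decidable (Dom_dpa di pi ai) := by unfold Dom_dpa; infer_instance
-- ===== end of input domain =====

-- B replaces A's per-query scan of all (di, pi) pairs by sort + prefix-max + binary search: O((n+m) log n) instead of O(n·m).

-- ===== PORT A =====
def dpa (di : List Int) (pi : List Int) (ai : List Int) : List Int :=
  let num : Nat := ai.length
  let count0 : List Int := List.replicate (num + 1) 0
  let count1 : List Int := PySem.List.pySetD count0 0 0
  let count2 : List Int := (PySem.List.pyRange 1 ((num : Int) + 1) 1).foldl
    (fun count j =>
      let tempPi : Int := (PySem.List.pyRange 0 (PySem.List.len di) 1).foldl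
        (fun tempPi i =>
          if PySem.List.pyGetD ai (j - 1) 0 - PySem.List.pyGetD di i 0 ≥ 0 then
            let temp := PySem.List.pyGetD pi i 0
            if temp > tempPi then temp else tempPi
          else tempPi) 0
      PySem.List.pySetD count j tempPi) count1
  PySem.List.slice count2 (some 1) none

-- ===== PORT B =====
-- the hand-written while-loop in Source B is exactly bisect_right; ported as the prelude primitive PySem.List.bisectRight (exact)
def dpa_alt (di : List Int) (pi : List Int) (ai : List Int) : List Int :=
  let pairs := PySem.List.sorted (di.zip pi) (fun t => t.1)
  let ds := pairs.map (fun t => t.1)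
  let s := pairs.foldl (fun (s : List Int × Int) t =>
      let best := if t.2 > s.2 then t.2 else s.2
      (s.1 ++ [best], best)) ([0], 0)
  let pm := s.1
  ai.foldl (fun out a =>
      out ++ [PySem.List.pyGetD pm ((PySem.List.bisectRight ds a : Nat) : Int) 0]) []

-- ===== PRECONDITION & SPEC =====
-- Pre_ excludes exactly the inputs where A raises IndexError: some query a reaches an
-- index i with len(pi) <= i < len(di) and di[i] <= a, so A reads pi[i] past the end.
def Pre_dpa (di : List Int) (pi : List Int) (ai : List Int) : Prop :=
  ∀ a ∈ ai, ∀ i : Nat, i < di.length → pi.length ≤ i → a < di.getD i 0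
instance (di : List Int) (pi : List Int) (ai : List Int) : Decidable (Pre_dpa di pi ai) := by
  unfold Pre_dpa; infer_instance
def pvWitness_dpa : List Int × List Int × List Int := ([1, 3], [5, 7], [2, 0, 4])
def Spec_dpa (di : List Int) (pi : List Int) (ai : List Int) (out : List Int) : Prop := out = dpa_alt di pi ai
instance (di : List Int) (pi : List Int) (ai : List Int) (out : List Int) : Decidable (Spec_dpa di pi ai out) := by unfold Spec_dpa; infer_instance

-- ===== CLAIM (what is proved, stated in full; the proofs are below) =====
def Claim_equal_dpa : Prop := ∀ (di : List Int) (pi : List Int) (ai : List Int), Dom_dpa di pi ai → Pre_dpa di pi ai → Spec_dpa di pi ai (dpa di pi ai)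

-- ===== LEMMAS AND PROOFS =====

-- the common value: max of 0 and all pi[i] with di[i] ≤ a, over the zipped pairs
def pvG (di : List Int) (pi : List Int) (a : Int) : Int :=
  ((di.zip pi).filter (fun t => t.1 ≤ a)).foldl (fun acc t => max acc t.2) 0

-- `if t > b then t else b` is `max b t`
theorem pv_if_max (b t : Int) : (if t > b then t else b) = max b t := by
  split_ifs <;> omega

-- A's inner loop over indices equals a fold over the filtered zip (under Pre_'s bound for this query)
theorem pvA_inner (di pi : List Int) (a : Int)
    (h : ∀ i : Nat, i < di.length → pi.length ≤ i → a < di.getD i 0) :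
    ∀ n : Nat, n ≤ di.length →
      (PySem.List.pyRange 0 (n : Int)).foldl
        (fun tempPi i =>
          if a - PySem.List.pyGetD di i 0 ≥ 0 then
            if PySem.List.pyGetD pi i 0 > tempPi then PySem.List.pyGetD pi i 0 else tempPi
          else tempPi) 0
      = (((di.zip pi).take n).filter (fun t => t.1 ≤ a)).foldl (fun acc t => max acc t.2) 0 := by
  intro n
  induction n with
  | zero => intro _; simp [PySem.List.pyRange_one_eq_nil]
  | succ n ih =>
    intro hn1
    have hn : n ≤ di.length := by omega
    have hlt : n < di.length := by omega
    rw [show ((n + 1 : Nat) : Int) = (n : Int) + 1 by push_cast; ring,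
      PySem.List.pyRange_one_succ_right (by positivity), List.foldl_append, ih hn]
    simp only [List.foldl_cons, List.foldl_nil]
    have hdi : PySem.List.pyGetD di (n : Int) 0 = di[n] := by
      rw [PySem.List.pyGetD_natCast, List.getD_eq_getElem _ _ hlt]
    by_cases hnp : n < pi.length
    · have hzlt : n < (di.zip pi).length := by simp [List.length_zip]; omega
      have htk : (di.zip pi).take (n + 1) = (di.zip pi).take n ++ [(di[n], pi[n])] := by
        rw [List.take_add_one, List.getElem?_eq_getElem hzlt, List.getElem_zip]
        rfl
      rw [htk, List.filter_append, List.foldl_append]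
      by_cases hc : di[n] ≤ a
      · have hge : a - PySem.List.pyGetD di (n : Int) 0 ≥ 0 := by rw [hdi]; omega
        rw [if_pos hge, PySem.List.pyGetD_natCast, List.getD_eq_getElem _ _ hnp, pv_if_max]
        simp [hc]
      · have hneg : ¬ (a - PySem.List.pyGetD di (n : Int) 0 ≥ 0) := by rw [hdi]; omega
        rw [if_neg hneg]
        simp [hc]
    · have hna : a < di[n] := by
        have := h n hlt (by omega)
        rwa [List.getD_eq_getElem _ _ hlt] at this
      have hneg : ¬ (a - PySem.List.pyGetD di (n : Int) 0 ≥ 0) := by rw [hdi]; omega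
      rw [if_neg hneg]
      have hzl : (di.zip pi).length ≤ n := by simp [List.length_zip]; omega
      rw [List.take_of_length_le hzl, List.take_of_length_le (by omega)]

-- the index-set loop writes T at positions s..s+k-1 and leaves the rest of the list alone
theorem pv_setloop (T : Int → Int) :
    ∀ (k : Nat) (s : Nat) (c : List Int), s + k ≤ c.length →
      (PySem.List.pyRange (s : Int) ((s : Int) + (k : Int))).foldl
          (fun c j => PySem.List.pySetD c j (T j)) c
      = c.take s ++ (List.range k).map (fun t : Nat => T ((s : Int) + (t : Int))) ++ c.drop (s + k) := by
  intro k
  induction k with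
  | zero =>
    intro s c _
    simp [PySem.List.pyRange_one_eq_nil, List.take_append_drop]
  | succ k ih =>
    intro s c hlen
    have hs : s < c.length := by omega
    have hlt : (s : Int) < (s : Int) + ((k + 1 : Nat) : Int) := by push_cast; omega
    rw [PySem.List.pyRange_one_cons hlt]
    simp only [List.foldl_cons]
    rw [PySem.List.pySetD_natCast]
    rw [show (s : Int) + ((k + 1 : Nat) : Int) = ((s + 1 : Nat) : Int) + ((k : Nat) : Int) by push_cast; ring]
    rw [show ((s : Int) + 1) = ((s + 1 : Nat) : Int) by push_cast; ring]
    rw [ih (s + 1) (c.set s (T s)) (by simp; omega)]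
    have hdrop : (c.set s (T s)).drop (s + 1 + k) = c.drop (s + 1 + k) := by
      rw [List.drop_set, if_pos (by omega)]
    have htake : (c.set s (T s)).take (s + 1) = c.take s ++ [T ((s : Nat) : Int)] := by
      rw [List.take_set, List.set_eq_take_append_cons_drop,
        if_pos (by simp [List.length_take]; omega)]
      rw [List.take_take, List.drop_eq_nil_of_le (by simp [List.length_take])]
      simp
    rw [hdrop, htake]
    rw [show s + 1 + k = s + (k + 1) by omega]
    have hmg : (List.range (k + 1)).map (fun t : Nat => T ((s : Int) + (t : Int)))
        = T ((s : Nat) : Int)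
          :: (List.range k).map (fun t : Nat => T (((s + 1 : Nat) : Int) + (t : Int))) := by
      apply List.ext_getElem
      · simp
      · intro t h1 h2
        cases t with
        | zero => simp
        | succ t =>
          have htk2 : t < k := by simpa using h1
          simp only [List.getElem_map, List.getElem_range, List.getElem_cons_succ]
          congr 1
          push_cast
          ring
    rw [hmg]
    simp [List.append_assoc]

-- A computes the per-query maxima, in query order
theorem pvA_eq_map (di pi ai : List Int) (hpre : Pre_dpa di pi ai) :
    dpa di pi ai = ai.map (fun a => pvG di pi a) := by
  have hsl := pv_setloop (fun j =>
      (PySem.List.pyRange 0 (PySem.List.len di)).foldl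
        (fun tempPi i =>
          if PySem.List.pyGetD ai (j - 1) 0 - PySem.List.pyGetD di i 0 ≥ 0 then
            if PySem.List.pyGetD pi i 0 > tempPi then PySem.List.pyGetD pi i 0 else tempPi
          else tempPi) 0)
    ai.length 1 (PySem.List.pySetD (List.replicate (ai.length + 1) 0) 0 0) (by
      rw [show (0 : Int) = ((0 : Nat) : Int) by norm_num, PySem.List.pySetD_natCast]
      simp only [List.length_set, List.length_replicate]
      omega)
  rw [show ((1 : Nat) : Int) = (1 : Int) by norm_num] at hsl
  rw [show ((1 : Int) + (ai.length : Int)) = (ai.length : Int) + 1 by ring] at hsl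
  simp only [dpa]
  rw [hsl]
  rw [PySem.List.slice_from _ (by norm_num : (0 : Int) ≤ 1)]
  have hc1 : PySem.List.pySetD (List.replicate (ai.length + 1) (0 : Int)) 0 0
      = (0 : Int) :: List.replicate ai.length 0 := by
    rw [show (0 : Int) = ((0 : Nat) : Int) by norm_num, PySem.List.pySetD_natCast,
      List.replicate_succ]
    rfl
  rw [hc1]
  have htk : List.take 1 ((0 : Int) :: List.replicate ai.length 0) = [0] := by simp
  have hdr : List.drop (1 + ai.length) ((0 : Int) :: List.replicate ai.length 0) = [] := by
    apply List.drop_eq_nil_of_le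
    simp
  rw [htk, hdr, List.append_nil, Int.toNat_one, List.singleton_append, List.drop_one,
    List.tail_cons]
  apply List.ext_getElem
  · simp
  · intro t h1t h2t
    have ht : t < ai.length := by simpa using h2t
    simp only [List.getElem_map, List.getElem_range]
    rw [show ((1 : Int) + (t : Int) - 1) = ((t : Nat) : Int) by omega]
    rw [PySem.List.pyGetD_natCast, List.getD_eq_getElem _ _ ht]
    have hmem : ai[t] ∈ ai := List.getElem_mem ht
    have hinner := pvA_inner di pi ai[t]
      (fun i hi hpi => hpre ai[t] hmem i hi hpi) di.length (le_refl _)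
    have hlen : PySem.List.len di = ((di.length : Nat) : Int) := by
      simp [PySem.List.len]
    rw [hlen, hinner, List.take_of_length_le (by simp [List.length_zip])]
    rfl

-- the prefix-max list built by B's first loop
theorem pv_pm_build (ps : List (Int × Int)) :
    ∀ (l : List Int) (b : Int),
      (ps.foldl (fun (s : List Int × Int) t =>
          (s.1 ++ [if t.2 > s.2 then t.2 else s.2], if t.2 > s.2 then t.2 else s.2)) (l, b)).1
      = l ++ (List.range ps.length).map
          (fun k => (ps.take (k + 1)).foldl (fun acc t => max acc t.2) b) := by
  induction ps with
  | nil => intro l b; simp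
  | cons t ps ih =>
    intro l b
    simp only [List.foldl_cons, List.length_cons]
    rw [ih, pv_if_max, List.range_succ_eq_map, List.map_cons, List.map_map]
    simp [Function.comp, List.take_succ_cons, List.append_assoc]

-- reading the prefix-max list at k gives the running max of the first k pairs
theorem pv_pm_getD (ps : List (Int × Int)) (k : Nat) (hk : k ≤ ps.length) :
    ((0 : Int) :: (List.range ps.length).map
        (fun k => (ps.take (k + 1)).foldl (fun acc t => max acc t.2) 0)).getD k 0
    = (ps.take k).foldl (fun acc t => max acc t.2) 0 := by
  cases k with
  | zero => simp
  | succ j =>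
    have hj : j < ps.length := by omega
    simp only [List.getD_cons_succ]
    rw [PySem.List.getD_map_range _ _ _ _ hj]

-- on a list whose first k entries have d ≤ a and the rest d > a, filter is take k
theorem pv_filter_take (P : List (Int × Int)) (a : Int) (k : Nat) (hk : k ≤ P.length)
    (hlo : ∀ (i : Nat) (h : i < P.length), i < k → (P[i]'h).1 ≤ a)
    (hhi : ∀ (i : Nat) (h : i < P.length), k ≤ i → a < (P[i]'h).1) :
    P.filter (fun t => t.1 ≤ a) = P.take k := by
  have h1 : (P.take k).filter (fun t => decide (t.1 ≤ a)) = P.take k := by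
    rw [List.filter_eq_self]
    intro x hx
    obtain ⟨i, hi, rfl⟩ := List.mem_iff_getElem.mp hx
    have hik : i < k := by simp [List.length_take] at hi; omega
    have hiP : i < P.length := by simp [List.length_take] at hi; omega
    rw [List.getElem_take]
    have hle := hlo i hiP hik
    simpa using hle
  have h2 : (P.drop k).filter (fun t => decide (t.1 ≤ a)) = [] := by
    rw [List.filter_eq_nil_iff]
    intro x hx
    obtain ⟨j, hj, rfl⟩ := List.mem_iff_getElem.mp hx
    have hjP : k + j < P.length := by simp [List.length_drop] at hj; omega
    rw [List.getElem_drop]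
    have hgt := hhi (k + j) hjP (by omega)
    simp only [decide_eq_true_eq]
    omega
  calc P.filter (fun t => decide (t.1 ≤ a))
      = (P.take k ++ P.drop k).filter (fun t => decide (t.1 ≤ a)) := by
        rw [List.take_append_drop]
    _ = P.take k := by rw [List.filter_append, h1, h2, List.append_nil]

-- on the sorted pair list, the pairs with d ≤ a are exactly the first bisectRight ones
theorem pv_take_bisect (di pi : List Int) (a : Int) :
    (PySem.List.sorted (di.zip pi) (fun t => t.1)).filter (fun t => t.1 ≤ a)
    = (PySem.List.sorted (di.zip pi) (fun t => t.1)).take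
        (PySem.List.bisectRight
          ((PySem.List.sorted (di.zip pi) (fun t => t.1)).map (fun t => t.1)) a) := by
  have hpw := PySem.List.sorted_map_key_pairwise (di.zip pi) (fun t => t.1)
  obtain ⟨hk, hlo, hhi⟩ := PySem.List.bisectRight_spec _ a hpw
  apply pv_filter_take
  · simpa using hk
  · intro i hiP hik
    have := hlo i (by simpa using hiP) hik
    simpa [List.getElem_map] using this
  · intro i hiP hik
    have := hhi i (by simpa using hiP) hik
    simpa [List.getElem_map] using this

-- folding max over a permutation gives the same value
theorem pv_foldl_max_perm (l₁ l₂ : List (Int × Int)) (hp : l₁.Perm l₂) (b : Int) :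
    l₁.foldl (fun acc t => max acc t.2) b = l₂.foldl (fun acc t => max acc t.2) b := by
  refine @List.Perm.foldl_eq _ _ _ _ _ ⟨fun x u v => ?_⟩ hp b
  show max (max x u.2) v.2 = max (max x v.2) u.2
  rw [max_right_comm]

-- B computes the per-query maxima, in query order
theorem pvB_eq_map (di pi ai : List Int) :
    dpa_alt di pi ai = ai.map (fun a => pvG di pi a) := by
  simp only [dpa_alt]
  rw [pv_pm_build, PySem.List.foldl_append_singleton_eq_map]
  simp only [List.nil_append]
  apply List.map_congr_left
  intro a _
  have hpw := PySem.List.sorted_map_key_pairwise (di.zip pi) (fun t => t.1)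
  obtain ⟨hk, hlo, hhi⟩ := PySem.List.bisectRight_spec _ a hpw
  have hkP : PySem.List.bisectRight
      ((PySem.List.sorted (di.zip pi) (fun t => t.1)).map (fun t => t.1)) a
      ≤ (PySem.List.sorted (di.zip pi) (fun t => t.1)).length := by simpa using hk
  rw [PySem.List.pyGetD_natCast, List.singleton_append, pv_pm_getD _ _ hkP,
    ← pv_take_bisect di pi a]
  unfold pvG
  exact pv_foldl_max_perm _ _
    ((PySem.List.sorted_perm (di.zip pi) (fun t => t.1) false).filter _) 0

-- ===== VERDICT (by name: the statement is the Claim_ definition above) =====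
theorem dpa_spec : Claim_equal_dpa := by
  intro di pi ai _hdom hpre
  unfold Spec_dpa
  rw [pvA_eq_map di pi ai hpre, pvB_eq_map]
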